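-- pv_equiv track=rewrite | github.com/a1ienforever/Applied-Algorithms | lb9/Vizing.py | check_uniqueness_of_colors
-- ===== SOURCE A (Python) =====
-- def check_uniqueness_of_colors(edge_colors):
--     color_usage = {}
--     for edge, color in edge_colors.items():
--         if color in color_usage:
--             color_usage[color].append(edge)
--         else:
--             color_usage[color] = [edge]
--     for edges in color_usage.values():
--         if len(edges) > 1:
--             return False
--     return True
-- ===== SOURCE B (Python) =====
-- def check_uniqueness_of_colors(edge_colors):
--     seen = set()
--     for color in edge_colors.values():
--         if color in seen:
--             return False
--         seen.add(color)
--     return True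
-- ===== Notes on version B (the rewrite author's own statement) =====
-- stated objective: simpler
-- what changed: Instead of grouping edges into a dict color->list-of-edges and then scanning all group sizes, B does one early-exit pass over the colors maintaining only a set of seen colors.
import Mathlib
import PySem

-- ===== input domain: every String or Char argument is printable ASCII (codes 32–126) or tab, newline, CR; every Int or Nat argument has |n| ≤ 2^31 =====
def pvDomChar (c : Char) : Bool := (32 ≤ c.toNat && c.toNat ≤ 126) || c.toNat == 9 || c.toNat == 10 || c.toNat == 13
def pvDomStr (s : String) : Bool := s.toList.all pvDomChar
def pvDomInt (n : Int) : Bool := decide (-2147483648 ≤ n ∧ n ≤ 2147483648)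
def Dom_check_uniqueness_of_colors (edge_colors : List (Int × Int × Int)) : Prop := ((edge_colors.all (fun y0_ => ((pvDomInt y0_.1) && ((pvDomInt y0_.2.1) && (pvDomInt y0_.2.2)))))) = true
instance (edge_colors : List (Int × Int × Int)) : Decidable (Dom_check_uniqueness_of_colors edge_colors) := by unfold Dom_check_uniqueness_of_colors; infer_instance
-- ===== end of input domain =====

-- B replaces A's dict of color->edge-list plus a group-size scan by a single early-exit pass over the colors with a seen-set (simpler; same cost).

-- ===== PORT A =====
def check_uniqueness_of_colors (edge_colors : List (Int × Int × Int)) : Bool :=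
  let color_usage : PySem.Dict Int (List (Int × Int)) :=
    edge_colors.foldl (fun d e =>
      let edge := (e.1, e.2.1)
      let color := e.2.2
      if d.contains color then d.modify color [] (fun l => l ++ [edge])
      else d.insert color [edge]) PySem.Dict.empty
  color_usage.values.all (fun edges => !(decide (1 < edges.length)))

-- ===== PORT B =====
def pvSeenGo (seen : PySem.Set Int) : List (Int × Int × Int) → Bool
  | [] => true
  | e :: rest =>
    if PySem.Set.contains seen e.2.2 then false
    else pvSeenGo (PySem.Set.add seen e.2.2) rest

def check_uniqueness_of_colors_alt (edge_colors : List (Int × Int × Int)) : Bool :=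
  pvSeenGo PySem.Set.empty edge_colors

-- ===== PRECONDITION & SPEC =====
def Spec_check_uniqueness_of_colors (edge_colors : List (Int × Int × Int)) (out : Bool) : Prop := out = check_uniqueness_of_colors_alt edge_colors
instance (edge_colors : List (Int × Int × Int)) (out : Bool) : Decidable (Spec_check_uniqueness_of_colors edge_colors out) := by unfold Spec_check_uniqueness_of_colors; infer_instance

-- ===== CLAIM (what is proved, stated in full; the proofs are below) =====
def Claim_equal_check_uniqueness_of_colors : Prop := ∀ (edge_colors : List (Int × Int × Int)), Dom_check_uniqueness_of_colors edge_colors → Spec_check_uniqueness_of_colors edge_colors (check_uniqueness_of_colors edge_colors)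

-- ===== LEMMAS AND PROOFS =====

-- B's loop returns true iff the colors of the remaining list are distinct and unseen.
theorem pvSeenGo_iff (seen : PySem.Set Int) (l : List (Int × Int × Int)) :
    pvSeenGo seen l = true ↔
      ((l.map (fun e => e.2.2)).Nodup ∧ ∀ c ∈ l.map (fun e => e.2.2), ¬ c ∈ seen) := by
  induction l generalizing seen with
  | nil => simp [pvSeenGo]
  | cons e rest ih =>
    by_cases h : e.2.2 ∈ seen
    · rw [show pvSeenGo seen (e :: rest) = false from by simp [pvSeenGo, h]]
      constructor
      · intro hf; cases hf
      · rintro ⟨-, hall⟩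
        exact absurd h (hall e.2.2 (by simp))
    · rw [show pvSeenGo seen (e :: rest) = pvSeenGo (PySem.Set.add seen e.2.2) rest from by
        simp [pvSeenGo, h]]
      rw [ih]
      simp only [List.map_cons, List.nodup_cons, List.mem_cons]
      constructor
      · rintro ⟨hnd, hall⟩
        refine ⟨⟨fun hm => ?_, hnd⟩, ?_⟩
        · exact (hall e.2.2 hm) ((PySem.Set.mem_add _ _ _).2 (Or.inr rfl))
        · rintro c (rfl | hm)
          · exact h
          · exact fun hs => (hall c hm) ((PySem.Set.mem_add _ _ _).2 (Or.inl hs))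
      · rintro ⟨⟨hne, hnd⟩, hall⟩
        refine ⟨hnd, fun c hm hs => ?_⟩
        rcases (PySem.Set.mem_add _ _ _).1 hs with hs' | rfl
        · exact (hall c (Or.inr hm)) hs'
        · exact hne hm

-- A's grouping fold is the pure modify-append fold (the two branches agree).
theorem pvFoldEq (l : List (Int × Int × Int)) (d : PySem.Dict Int (List (Int × Int))) :
    l.foldl (fun d e =>
        if d.contains e.2.2 then d.modify e.2.2 [] (fun l => l ++ [(e.1, e.2.1)])
        else d.insert e.2.2 [(e.1, e.2.1)]) d
    = (l.map (fun e => (e.2.2, (e.1, e.2.1)))).foldl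
        (fun d p => d.modify p.1 [] (fun l => l ++ [p.2])) d := by
  rw [List.foldl_map]
  refine PySem.List.foldl_congr_mem l _ _ d (fun d e _ => ?_)
  by_cases h : d.contains e.2.2 = true
  · simp only [if_pos h]
  · have h' : d.contains e.2.2 = false := by simpa using h
    simp only [if_neg h, PySem.Dict.modify,
      PySem.Dict.getD_of_not_contains d ([] : List (Int × Int)) h', List.nil_append]

-- count of a color = length of the filtered pair list
theorem pvCountFilter (c : Int) (l : List (Int × (Int × Int))) :
    (l.map Prod.fst).count c = (l.filter (fun p => p.1 == c)).length := by
  induction l with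
  | nil => simp
  | cons a t ih =>
    by_cases h : a.1 = c
    · simp [h, ih]
    · simp [h, ih]

theorem check_uniqueness_of_colors_spec : Claim_equal_check_uniqueness_of_colors := by
  intro edge_colors _
  unfold Spec_check_uniqueness_of_colors
  unfold check_uniqueness_of_colors check_uniqueness_of_colors_alt
  simp only [pvFoldEq]
  set l := edge_colors.map (fun e => (e.2.2, (e.1, e.2.1))) with hl
  set D := l.foldl (fun d p => d.modify p.1 [] (fun l => l ++ [p.2])) PySem.Dict.empty with hD
  have hkeysnd : D.keys.Nodup := by
    rw [hD]
    exact PySem.Dict.nodup_keys_foldl_modify_key l Prod.fst [] (fun _ p v => v ++ [p.2]) _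
      PySem.Dict.nodup_keys_empty
  have hkeys : D.keys = PySem.Set.ofList (l.map Prod.fst) := by
    rw [hD]
    have := PySem.Dict.keys_foldl_modify_key (l := l) (key := Prod.fst) (d0 := [])
      (f := fun _ p v => v ++ [p.2]) (d := PySem.Dict.empty)
    simpa [PySem.Set.update_nil_left] using this
  have hvals : D.values = D.keys.map (fun k => D.getD k []) :=
    PySem.Dict.values_eq_map_keys D hkeysnd []
  have hgetD : ∀ c, D.getD c [] = (l.filter (fun p => p.1 == c)).map (·.2) := by
    intro c
    rw [hD, PySem.Dict.getD_foldl_modify_append]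
    simp
  rw [Bool.eq_iff_iff, pvSeenGo_iff]
  have hmapfst : l.map Prod.fst = edge_colors.map (fun e => e.2.2) := by
    simp [hl]
  constructor
  · -- A = true → B side
    intro hA
    rw [hvals, List.all_map] at hA
    rw [List.all_eq_true] at hA
    refine ⟨?_, by simp [PySem.Set.empty]⟩
    rw [List.nodup_iff_count_le_one]
    intro c
    by_cases hm : c ∈ edge_colors.map (fun e => e.2.2)
    · have hmk : c ∈ D.keys := by
        rw [hkeys, hmapfst]; exact (PySem.Set.mem_ofList _ _).2 hm
      have := hA c hmk
      simp only [Function.comp, hgetD c, Bool.not_eq_eq_eq_not, Bool.not_true,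
        decide_eq_false_iff_not, not_lt, List.length_map] at this
      calc (edge_colors.map (fun e => e.2.2)).count c
          = (l.filter (fun p => p.1 == c)).length := by
            rw [← hmapfst, pvCountFilter]
        _ ≤ 1 := this
    · simp [List.count_eq_zero_of_not_mem hm]
  · -- B side → A = true
    rintro ⟨hnd, -⟩
    rw [hvals, List.all_map, List.all_eq_true]
    intro c hmk
    simp only [Function.comp, hgetD c, Bool.not_eq_eq_eq_not, Bool.not_true,
      decide_eq_false_iff_not, not_lt, List.length_map]
    have : (l.filter (fun p => p.1 == c)).length = (edge_colors.map (fun e => e.2.2)).count c := by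
      rw [← hmapfst, pvCountFilter]
    rw [this]
    exact List.nodup_iff_count_le_one.1 hnd c
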